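-- pv_equiv track=rewrite | github.com/CharlesJub/Meal-Planner | app/parsing.py | split_embedded_instruction
-- ===== SOURCE A (Python) =====
-- INSTRUCTION_PREFIXES = (
--     "add ",
--     "arrange ",
--     "bake ",
--     "blend ",
--     "boil ",
--     "bring ",
--     "broil ",
--     "combine ",
--     "cook ",
--     "cover ",
--     "drizzle ",
--     "fry ",
--     "garnish ",
--     "grill ",
--     "heat ",
--     "marinate ",
--     "mix ",
--     "place ",
--     "poach ",
--     "pour ",
--     "preheat ",
--     "reduce ",
--     "remove ",
--     "saute ",
--     "season ",
--     "serve ",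
--     "slash ",
--     "shred ",
--     "simmer ",
--     "stir ",
--     "transfer ",
--     "whisk ",
--     "when ",
-- )
--
-- def split_embedded_instruction(line: str) -> tuple[str, str] | None:
--     lowered = line.lower()
--     matches = []
--
--     for prefix in INSTRUCTION_PREFIXES:
--         search_start = 1 if lowered.startswith(prefix) else 0
--         index = lowered.find(prefix, search_start)
--         if index > 0:
--             matches.append(index)
--
--     if not matches:
--         return None
--
--     split_index = min(matches)
--     ingredient_part = line[:split_index].strip(" ,.;:")
--     instruction_part = line[split_index:].strip()
--     if not ingredient_part or not instruction_part:
--         return None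
--
--     return ingredient_part, instruction_part
-- ===== SOURCE B (Python) =====
-- INSTRUCTION_PREFIXES = (
--     "add ", "arrange ", "bake ", "blend ", "boil ", "bring ", "broil ",
--     "combine ", "cook ", "cover ", "drizzle ", "fry ", "garnish ", "grill ",
--     "heat ", "marinate ", "mix ", "place ", "poach ", "pour ", "preheat ",
--     "reduce ", "remove ", "saute ", "season ", "serve ", "slash ", "shred ",
--     "simmer ", "stir ", "transfer ", "whisk ", "when ",
-- )
--
-- def split_embedded_instruction(line: str) -> tuple[str, str] | None:
--     lowered = line.lower()
--     split_index = None
--     for i in range(1, len(lowered)):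
--         if any(lowered.startswith(p, i) for p in INSTRUCTION_PREFIXES):
--             split_index = i
--             break
--     if split_index is None:
--         return None
--     ingredient_part = line[:split_index].strip(" ,.;:")
--     instruction_part = line[split_index:].strip()
--     if not ingredient_part or not instruction_part:
--         return None
--     return ingredient_part, instruction_part
-- ===== Notes on version B (the rewrite author's own statement) =====
-- stated objective: alternative
-- what changed: Replaces the 33 per-prefix whole-string find() scans collected into a list and reduced with min() by a single left-to-right scan over positions >= 1 that stops at the first position where any prefix matches.
import Mathlib
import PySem

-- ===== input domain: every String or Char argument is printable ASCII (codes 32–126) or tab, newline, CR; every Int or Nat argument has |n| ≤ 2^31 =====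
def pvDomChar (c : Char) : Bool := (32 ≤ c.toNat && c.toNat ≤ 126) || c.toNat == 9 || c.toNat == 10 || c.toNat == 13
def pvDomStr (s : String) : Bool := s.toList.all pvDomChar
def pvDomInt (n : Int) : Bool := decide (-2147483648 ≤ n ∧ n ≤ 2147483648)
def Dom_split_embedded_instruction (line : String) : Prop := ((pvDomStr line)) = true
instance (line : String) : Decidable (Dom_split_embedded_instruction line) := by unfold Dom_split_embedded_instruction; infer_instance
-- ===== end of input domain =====

-- B replaces A's 33 per-prefix whole-string scans collected into a list and reduced with min() by a
-- single left-to-right scan that stops at the first position ≥ 1 where some prefix matches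
-- (objective: alternative algorithm, same result).

def pvPrefixes : List String := ["add ", "arrange ", "bake ", "blend ", "boil ", "bring ", "broil ", "combine ", "cook ", "cover ", "drizzle ", "fry ", "garnish ", "grill ", "heat ", "marinate ", "mix ", "place ", "poach ", "pour ", "preheat ", "reduce ", "remove ", "saute ", "season ", "serve ", "slash ", "shred ", "simmer ", "stir ", "transfer ", "whisk ", "when "]

-- ===== PORT A =====
def split_embedded_instruction (line : String) : Option (String × String) :=
  let lowered := PySem.Str.lower line
  let matches_ : List Int := pvPrefixes.foldl
    (fun acc prefix_ =>
      let searchStart : Int := if PySem.Str.startswith lowered prefix_ then 1 else 0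
      let index : Int := PySem.Str.findFrom lowered prefix_ searchStart
      if index > 0 then acc ++ [index] else acc) []
  match PySem.List.min? matches_ (fun x => x) with
  | none => none
  | some splitIndex =>
      let ingredientPart := PySem.Str.stripChars (PySem.Str.slice line none (some splitIndex)) " ,.;:"
      let instructionPart := PySem.Str.strip (PySem.Str.slice line (some splitIndex) none)
      if ingredientPart = "" ∨ instructionPart = "" then none
      else some (ingredientPart, instructionPart)

-- ===== PORT B =====
-- Source B's 'for i in range(1, len(lowered)): if any(lowered.startswith(p, i) ...): break'
-- as structural recursion over the suffix lowered[i:] carrying the position i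
-- (Python's startswith(p, i) tests p against exactly that suffix)
def pvFirstMatchFrom : List Char → Nat → Option Nat
  | [], _ => none
  | c :: rest, i =>
      if pvPrefixes.any (fun p => PySem.Chars.startswith (c :: rest) p.toList) then some i
      else pvFirstMatchFrom rest (i + 1)

def split_embedded_instruction_alt (line : String) : Option (String × String) :=
  let lowered := PySem.Str.lower line
  match pvFirstMatchFrom (lowered.toList.drop 1) 1 with
  | none => none
  | some i =>
      let splitIndex : Int := (i : Int)
      let ingredientPart := PySem.Str.stripChars (PySem.Str.slice line none (some splitIndex)) " ,.;:"
      let instructionPart := PySem.Str.strip (PySem.Str.slice line (some splitIndex) none)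
      if ingredientPart = "" ∨ instructionPart = "" then none
      else some (ingredientPart, instructionPart)

-- ===== PRECONDITION & SPEC =====
def Spec_split_embedded_instruction (line : String) (out : Option (String × String)) : Prop := out = split_embedded_instruction_alt line
instance (line : String) (out : Option (String × String)) : Decidable (Spec_split_embedded_instruction line out) := by unfold Spec_split_embedded_instruction; infer_instance

-- ===== CLAIM (what is proved, stated in full; the proofs are below) =====
def Claim_equal_split_embedded_instruction : Prop := ∀ (line : String), Dom_split_embedded_instruction line → Spec_split_embedded_instruction line (split_embedded_instruction line)

-- ===== LEMMAS AND PROOFS =====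

-- A's per-prefix computation: find(prefix, 1 if startswith else 0)
def pvG (s p : String) : Int :=
  PySem.Str.findFrom s p (if PySem.Str.startswith s p then 1 else 0)

-- an occurrence of p at a position j ≥ 1 of L
def pvOcc (L p : List Char) (j : Nat) : Prop := 1 ≤ j ∧ p <+: L.drop j

-- B's inner test: some prefix matches at the head of t
def pvQ (t : List Char) : Bool := pvPrefixes.any (fun p => PySem.Chars.startswith t p.toList)

lemma pvPrefixes_ne_nil : ∀ p ∈ pvPrefixes, p.toList ≠ [] := by decide

lemma pvQ_nil : pvQ [] = false := by decide

lemma pvQ_iff (t : List Char) : pvQ t = true ↔ ∃ p ∈ pvPrefixes, p.toList <+: t := by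
  simp [pvQ, List.any_eq_true, PySem.Chars.startswith_iff]

lemma pv_exists_drop_iff_infix (p L : List Char) : (∃ j, p <+: L.drop j) ↔ p <:+: L := by
  constructor
  · rintro ⟨j, hj⟩
    exact List.infix_iff_prefix_suffix.mpr ⟨L.drop j, hj, List.drop_suffix j L⟩
  · intro h
    obtain ⟨t, hpt, hts⟩ := List.infix_iff_prefix_suffix.mp h
    obtain ⟨u, rfl⟩ := hts
    exact ⟨u.length, by simpa using hpt⟩

-- pvG s p > 0 iff p occurs in s at some position ≥ 1, and then (pvG s p).toNat is the least such position
lemma pvG_spec (s p : String) (hp : p.toList ≠ []) :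
    (0 < pvG s p ↔ ∃ j, pvOcc s.toList p.toList j) ∧
    (0 < pvG s p → pvOcc s.toList p.toList (pvG s p).toNat ∧
       ∀ i, pvOcc s.toList p.toList i → (pvG s p).toNat ≤ i) := by
  unfold pvG pvOcc
  rw [PySem.Str.findFrom_eq, PySem.Str.startswith_eq]
  by_cases hsw : PySem.Chars.startswith s.toList p.toList = true
  · have hpre : p.toList <+: s.toList := (PySem.Chars.startswith_iff _ _).mp hsw
    have hlen : 1 ≤ s.toList.length := by
      cases hS : s.toList with
      | nil => rw [hS] at hpre; exact absurd (List.prefix_nil.mp hpre) hp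
      | cons c t => simp
    rw [hsw, if_pos rfl]
    by_cases hF : PySem.Chars.findFrom s.toList p.toList 1 none = -1
    · have hni : ¬ p.toList <:+: s.toList.drop 1 := by
        have := (PySem.Chars.findFrom_natCast_eq_neg_one_iff s.toList p.toList 1 hlen)
        simpa using this.mp (by simpa using hF)
      have hnone : ¬ ∃ j, 1 ≤ j ∧ p.toList <+: s.toList.drop j := by
        rintro ⟨j, hj1, hjp⟩
        apply hni
        apply (pv_exists_drop_iff_infix _ _).mp
        refine ⟨j - 1, ?_⟩
        rw [List.drop_drop]
        have : 1 + (j - 1) = j := by omega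
        rw [this]; exact hjp
      rw [hF]
      constructor
      · constructor
        · intro h; norm_num at h
        · intro h; exact absurd h hnone
      · intro h; norm_num at h
    · have hspec := PySem.Chars.findFrom_natCast_spec s.toList p.toList 1 hlen (by simpa using hF)
      simp only [Nat.cast_one] at hspec
      obtain ⟨h1, h2, h3⟩ := hspec
      set F := PySem.Chars.findFrom s.toList p.toList 1 none with hFdef
      have hpos : 0 < F := by omega
      refine ⟨⟨fun _ => ⟨F.toNat, by omega, h2⟩, fun _ => hpos⟩, fun _ => ⟨⟨by omega, h2⟩, ?_⟩⟩
      intro i ⟨hi1, hip⟩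
      by_contra hlt
      exact h3 i hi1 (by omega) hip
  · have hnpre : ¬ p.toList <+: s.toList := fun h =>
      hsw ((PySem.Chars.startswith_iff _ _).mpr h)
    rw [if_neg hsw]
    rw [PySem.Chars.findFrom_zero]
    by_cases hF : PySem.Chars.find s.toList p.toList = -1
    · have hni : ¬ p.toList <:+: s.toList := (PySem.Chars.find_eq_neg_one_iff _ _).mp hF
      have hnone : ¬ ∃ j, 1 ≤ j ∧ p.toList <+: s.toList.drop j := by
        rintro ⟨j, _, hjp⟩
        exact hni ((pv_exists_drop_iff_infix _ _).mp ⟨j, hjp⟩)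
      rw [hF]
      refine ⟨⟨fun h => by norm_num at h, fun h => absurd h hnone⟩, fun h => by norm_num at h⟩
    · have hge : 0 ≤ PySem.Chars.find s.toList p.toList := by
        have := PySem.Chars.neg_one_le_find s.toList p.toList
        omega
      obtain ⟨h2, h3⟩ := PySem.Chars.find_spec hge
      set F := PySem.Chars.find s.toList p.toList with hFdef
      have hne0 : F.toNat ≠ 0 := by
        intro h0
        rw [h0] at h2
        simp at h2
        exact hnpre h2
      have hpos : 0 < F := by omega
      refine ⟨⟨fun _ => ⟨F.toNat, by omega, h2⟩, fun _ => hpos⟩, fun _ => ⟨⟨by omega, h2⟩, ?_⟩⟩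
      intro i ⟨hi1, hip⟩
      by_contra hlt
      exact h3 i (by omega) hip

lemma pvFirstMatchFrom_none (l : List Char) (i : Nat) :
    pvFirstMatchFrom l i = none ↔ ∀ k, pvQ (l.drop k) = false := by
  induction l generalizing i with
  | nil => simp [pvFirstMatchFrom, pvQ_nil]
  | cons c rest ih =>
    rw [pvFirstMatchFrom]
    by_cases hQ : pvQ (c :: rest) = true
    · rw [if_pos (by simpa [pvQ] using hQ)]
      simp only [reduceCtorEq, false_iff]
      intro h
      have := h 0
      rw [List.drop_zero] at this
      rw [this] at hQ
      exact absurd hQ (by simp)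
    · rw [if_neg (by simpa [pvQ] using hQ)]
      rw [ih]
      constructor
      · intro h k
        cases k with
        | zero => simpa using Bool.eq_false_iff.mpr (by simpa using hQ)
        | succ k' => simpa using h k'
      · intro h k
        simpa using h (k + 1)

lemma pvFirstMatchFrom_some (l : List Char) (i j : Nat) :
    pvFirstMatchFrom l i = some j ↔
      ∃ k, j = i + k ∧ pvQ (l.drop k) = true ∧ ∀ m < k, pvQ (l.drop m) = false := by
  induction l generalizing i with
  | nil =>
    simp only [pvFirstMatchFrom, reduceCtorEq, false_iff]
    rintro ⟨k, -, hk, -⟩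
    rw [List.drop_nil, pvQ_nil] at hk
    exact absurd hk (by simp)
  | cons c rest ih =>
    rw [pvFirstMatchFrom]
    by_cases hQ : pvQ (c :: rest) = true
    · rw [if_pos (by simpa [pvQ] using hQ)]
      constructor
      · intro h
        have hji : j = i := by simpa using h.symm
        exact ⟨0, by omega, by simpa using hQ, by omega⟩
      · rintro ⟨k, hjk, hk, hmin⟩
        cases k with
        | zero => simp [hjk]
        | succ k' =>
          have h0 := hmin 0 (by omega)
          rw [List.drop_zero] at h0
          rw [h0] at hQ
          exact absurd hQ (by simp)
    · rw [if_neg (by simpa [pvQ] using hQ)]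
      rw [ih]
      constructor
      · rintro ⟨k', hjk, hk, hmin⟩
        refine ⟨k' + 1, by omega, by simpa using hk, ?_⟩
        intro m hm
        cases m with
        | zero => simpa using Bool.eq_false_iff.mpr (by simpa using hQ)
        | succ m' => simpa using hmin m' (by omega)
      · rintro ⟨k, hjk, hk, hmin⟩
        cases k with
        | zero => exact absurd (by simpa using hk) (by simpa [pvQ] using hQ)
        | succ k' =>
          refine ⟨k', by omega, by simpa using hk, ?_⟩
          intro m hm
          simpa using hmin (m + 1) (by omega)

-- A's min(matches) equals B's first-match position
lemma pvMinMatches_eq (line : String) :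
    PySem.List.min? (pvPrefixes.foldl
      (fun acc prefix_ =>
        let searchStart : Int := if PySem.Str.startswith (PySem.Str.lower line) prefix_ then 1 else 0
        let index : Int := PySem.Str.findFrom (PySem.Str.lower line) prefix_ searchStart
        if index > 0 then acc ++ [index] else acc) []) (fun x => x)
    = Option.map Int.ofNat (pvFirstMatchFrom ((PySem.Str.lower line).toList.drop 1) 1) := by
  have hfold : pvPrefixes.foldl
      (fun acc prefix_ =>
        let searchStart : Int := if PySem.Str.startswith (PySem.Str.lower line) prefix_ then 1 else 0
        let index : Int := PySem.Str.findFrom (PySem.Str.lower line) prefix_ searchStart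
        if index > 0 then acc ++ [index] else acc) []
      = [] ++ (pvPrefixes.filter (fun pre => decide (0 < pvG (PySem.Str.lower line) pre))).map (pvG (PySem.Str.lower line)) :=
    PySem.List.foldl_append_ite (fun pre => 0 < pvG (PySem.Str.lower line) pre) (pvG (PySem.Str.lower line)) pvPrefixes []
  rw [hfold, List.nil_append]
  cases h : pvFirstMatchFrom ((PySem.Str.lower line).toList.drop 1) 1 with
  | none =>
    rw [pvFirstMatchFrom_none] at h
    have hnoQ : ∀ jj, 1 ≤ jj → pvQ ((PySem.Str.lower line).toList.drop jj) = false := by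
      intro jj hjj
      have hk := h (jj - 1)
      rw [List.drop_drop] at hk
      have : 1 + (jj - 1) = jj := by omega
      rwa [this] at hk
    rw [Option.map_none]
    apply (PySem.List.min?_eq_none_iff _ _).mpr
    rw [List.map_eq_nil_iff, List.filter_eq_nil_iff]
    intro p hmem
    simp only [decide_eq_true_eq]
    intro hpos
    obtain ⟨j, hj1, hjp⟩ := ((pvG_spec (PySem.Str.lower line) p (pvPrefixes_ne_nil p hmem)).1).mp hpos
    have := (pvQ_iff _).mpr ⟨p, hmem, hjp⟩
    rw [hnoQ j hj1] at this
    exact absurd this (by simp)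
  | some j =>
    rw [pvFirstMatchFrom_some] at h
    obtain ⟨k, hjk, hQk, hmin⟩ := h
    rw [List.drop_drop] at hQk
    have hj1 : 1 ≤ j := by omega
    have hQj : pvQ ((PySem.Str.lower line).toList.drop j) = true := by
      have : 1 + k = j := by omega
      rwa [this] at hQk
    have hminQ : ∀ m, 1 ≤ m → m < j → pvQ ((PySem.Str.lower line).toList.drop m) = false := by
      intro m hm1 hmj
      have hk := hmin (m - 1) (by omega)
      rw [List.drop_drop] at hk
      have : 1 + (m - 1) = m := by omega
      rwa [this] at hk
    obtain ⟨p₀, hp₀mem, hp₀pre⟩ := (pvQ_iff _).mp hQj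
    have hspec₀ := pvG_spec (PySem.Str.lower line) p₀ (pvPrefixes_ne_nil p₀ hp₀mem)
    have hg₀pos : 0 < pvG (PySem.Str.lower line) p₀ := hspec₀.1.mpr ⟨j, hj1, hp₀pre⟩
    obtain ⟨hocc₀, hmin₀⟩ := hspec₀.2 hg₀pos
    have ht₀le : (pvG (PySem.Str.lower line) p₀).toNat ≤ j := hmin₀ j ⟨hj1, hp₀pre⟩
    have hQt₀ : pvQ ((PySem.Str.lower line).toList.drop (pvG (PySem.Str.lower line) p₀).toNat) = true :=
      (pvQ_iff _).mpr ⟨p₀, hp₀mem, hocc₀.2⟩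
    have hjle : j ≤ (pvG (PySem.Str.lower line) p₀).toNat := by
      by_contra hlt
      rw [hminQ _ hocc₀.1 (by omega)] at hQt₀
      exact absurd hQt₀ (by simp)
    have hg₀ : pvG (PySem.Str.lower line) p₀ = (j : Int) := by omega
    have hmemM : (j : Int) ∈ (pvPrefixes.filter (fun pre => decide (0 < pvG (PySem.Str.lower line) pre))).map (pvG (PySem.Str.lower line)) := by
      rw [List.mem_map]
      exact ⟨p₀, List.mem_filter.mpr ⟨hp₀mem, by simpa using hg₀pos⟩, hg₀⟩
    have hlb : ∀ y ∈ (pvPrefixes.filter (fun pre => decide (0 < pvG (PySem.Str.lower line) pre))).map (pvG (PySem.Str.lower line)), (j : Int) ≤ y := by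
      intro y hy
      rw [List.mem_map] at hy
      obtain ⟨p₁, hp₁f, rfl⟩ := hy
      rw [List.mem_filter] at hp₁f
      obtain ⟨hp₁mem, hp₁pos'⟩ := hp₁f
      have hp₁pos : 0 < pvG (PySem.Str.lower line) p₁ := by simpa using hp₁pos'
      obtain ⟨hocc₁, _⟩ := (pvG_spec (PySem.Str.lower line) p₁ (pvPrefixes_ne_nil p₁ hp₁mem)).2 hp₁pos
      have hQt₁ : pvQ ((PySem.Str.lower line).toList.drop (pvG (PySem.Str.lower line) p₁).toNat) = true :=
        (pvQ_iff _).mpr ⟨p₁, hp₁mem, hocc₁.2⟩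
      have : j ≤ (pvG (PySem.Str.lower line) p₁).toNat := by
        by_contra hlt
        rw [hminQ _ hocc₁.1 (by omega)] at hQt₁
        exact absurd hQt₁ (by simp)
      omega
    cases hm : PySem.List.min? ((pvPrefixes.filter (fun pre => decide (0 < pvG (PySem.Str.lower line) pre))).map (pvG (PySem.Str.lower line))) (fun x => x) with
    | none =>
      rw [PySem.List.min?_eq_none_iff] at hm
      rw [hm] at hmemM
      exact absurd hmemM (by simp)
    | some m =>
      have hmmem := PySem.List.min?_mem hm
      have h1 : (j : Int) ≤ m := hlb m hmmem
      have h2 : m ≤ (j : Int) := PySem.List.min?_isMin hm _ hmemM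
      have : m = (j : Int) := le_antisymm h2 h1
      rw [this, Option.map_some]
      rfl

-- ===== VERDICT (by name: the statement is the Claim_ definition above) =====
theorem split_embedded_instruction_spec : Claim_equal_split_embedded_instruction := by
  intro line _
  unfold Spec_split_embedded_instruction
  unfold split_embedded_instruction split_embedded_instruction_alt
  dsimp only
  rw [pvMinMatches_eq]
  cases h : pvFirstMatchFrom ((PySem.Str.lower line).toList.drop 1) 1 <;> simp
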